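-- pv_equiv track=rewrite | github.com/larocs/attention_dl | mk_citation_graphs.py | get_rev_graph
-- ===== SOURCE A (Python) =====
-- def get_all_nodes(graph):
--     all_nodes = set(graph.keys())
--     #all_nodes |= reduce(lambda a, b: set(a) | set(b), graph.values(), set())
--     return all_nodes
--
-- def get_rev_graph(graph):
--     all_nodes = get_all_nodes(graph)
--     rev_graph = {node: set() for node in all_nodes}
--     for to_node in all_nodes:
--         for from_node, nodes in graph.items():
--             if to_node in nodes and from_node in all_nodes:
--                 rev_graph[to_node].add(from_node)
--     return rev_graph
-- ===== SOURCE B (Python) =====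
-- def get_rev_graph(graph):
--     preds = {}
--     for from_node, nbrs in graph.items():
--         for to_node in nbrs:
--             if to_node in graph:
--                 preds.setdefault(to_node, set()).add(from_node)
--     return {node: preds.get(node, set()) for node in graph}
-- ===== Notes on version B (the rewrite author's own statement) =====
-- stated objective: faster
-- what changed: Replaced A's loop over all nodes with an inner scan of every edge list by a single grouping pass over the edges (setdefault-accumulated predecessor sets, no pre-initialized dict) followed by one comprehension that reads the groups back per key.
import Mathlib
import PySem

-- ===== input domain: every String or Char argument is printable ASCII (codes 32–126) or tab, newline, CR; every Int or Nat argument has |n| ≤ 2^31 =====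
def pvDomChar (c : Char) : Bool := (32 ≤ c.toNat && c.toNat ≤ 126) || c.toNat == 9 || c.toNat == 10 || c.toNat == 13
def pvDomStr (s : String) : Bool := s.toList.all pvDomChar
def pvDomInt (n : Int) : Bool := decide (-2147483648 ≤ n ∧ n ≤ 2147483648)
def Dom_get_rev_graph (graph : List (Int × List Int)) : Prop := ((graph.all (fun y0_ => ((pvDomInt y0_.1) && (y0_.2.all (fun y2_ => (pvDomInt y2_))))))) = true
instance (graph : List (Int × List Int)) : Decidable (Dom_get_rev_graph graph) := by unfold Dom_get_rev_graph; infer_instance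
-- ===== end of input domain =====

-- B replaces A's loop over all nodes (each with an inner scan of every edge list) by one
-- grouping pass over the edges (setdefault-accumulated predecessor sets, no pre-initialized
-- dict) plus a final comprehension reading the groups back per key — an asymptotically
-- faster algorithm. The equivalence is about the RETURN value (neither mutates its argument).

-- ===== PORT A =====
def get_all_nodes (graph : List (Int × List Int)) : PySem.Set Int :=
  PySem.Set.ofList (graph.map Prod.fst)

def get_rev_graph (graph : List (Int × List Int)) : List (Int × List Int) :=
  let all_nodes := get_all_nodes graph
  let rev_graph : PySem.Dict Int (PySem.Set Int) :=
    PySem.Dict.ofList (all_nodes.map (fun node => (node, PySem.Set.empty)))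
  let rev_graph := all_nodes.foldl (fun rev to_node =>
    graph.foldl (fun rev p =>
      if p.2.contains to_node && all_nodes.contains p.1 then
        rev.modify to_node PySem.Set.empty (fun s => PySem.Set.add s p.1)
      else rev) rev) rev_graph
  rev_graph.items

-- ===== PORT B =====
def get_rev_graph_alt (graph : List (Int × List Int)) : List (Int × List Int) :=
  let preds : PySem.Dict Int (PySem.Set Int) :=
    graph.foldl (fun preds p =>
      p.2.foldl (fun preds to_node =>
        if (graph.map Prod.fst).contains to_node then
          (preds.setdefault to_node PySem.Set.empty).modify to_node PySem.Set.empty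
            (fun s => PySem.Set.add s p.1)
        else preds) preds) PySem.Dict.empty
  graph.map (fun q => (q.1, preds.getD q.1 PySem.Set.empty))

-- ===== PRECONDITION & SPEC =====
-- Pre_ excludes association lists with duplicate keys: they do not represent any Python
-- dict (A's parameter is a dict, so duplicate keys cannot reach A).
def Pre_get_rev_graph (graph : List (Int × List Int)) : Prop :=
  (graph.map Prod.fst).Nodup
instance (graph : List (Int × List Int)) : Decidable (Pre_get_rev_graph graph) := by
  unfold Pre_get_rev_graph; infer_instance

def pvWitness_get_rev_graph : (List (Int × List Int)) := [(1, [2]), (2, [1, 3])]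

def Spec_get_rev_graph (graph : List (Int × List Int)) (out : List (Int × List Int)) : Prop := out = get_rev_graph_alt graph
instance (graph : List (Int × List Int)) (out : List (Int × List Int)) : Decidable (Spec_get_rev_graph graph out) := by unfold Spec_get_rev_graph; infer_instance

-- ===== CLAIM (what is proved, stated in full; the proofs are below) =====
def Claim_equal_get_rev_graph : Prop := ∀ (graph : List (Int × List Int)), Dom_get_rev_graph graph → Pre_get_rev_graph graph → Spec_get_rev_graph graph (get_rev_graph graph)

-- ===== LEMMAS AND PROOFS =====

-- a per-target fold of conditional adds, seen at a fixed starting set s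
theorem pv_inner_fold (nbrs : List Int) (t f : Int) (s : PySem.Set Int) :
    nbrs.foldl (fun s x => if x = t then PySem.Set.add s f else s) s
      = if nbrs.contains t then PySem.Set.add s f else s := by
  induction nbrs generalizing s with
  | nil => simp
  | cons x rest ih =>
    by_cases hx : x = t
    · subst hx
      simp [List.foldl_cons, ih]
    · simp [List.foldl_cons, hx, ih, List.contains_eq_mem, Ne.symm hx]

-- the dict produced by A's initial comprehension: every lookup (at default ∅) is ∅
theorem pv_getD_init_aux (L : List Int) (d : PySem.Dict Int (PySem.Set Int))
    (hd : ∀ x, d.getD x PySem.Set.empty = PySem.Set.empty) (x : Int) :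
    (L.foldl (fun d n => d.insert n PySem.Set.empty) d).getD x PySem.Set.empty
      = PySem.Set.empty := by
  induction L generalizing d with
  | nil => exact hd x
  | cons n rest ih =>
    refine ih _ (fun y => ?_)
    rw [PySem.Dict.getD_insert]
    split
    · rfl
    · exact hd y

theorem pv_ofList_foldl (L : List Int) :
    PySem.Dict.ofList (L.map (fun n => (n, (PySem.Set.empty : PySem.Set Int))))
      = L.foldl (fun d n => d.insert n PySem.Set.empty) PySem.Dict.empty := by
  simp [PySem.Dict.ofList, PySem.Dict.update, List.foldl_map]

theorem pv_getD_init (L : List Int) (x : Int) :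
    (PySem.Dict.ofList (L.map (fun n => (n, (PySem.Set.empty : PySem.Set Int))))).getD
        x PySem.Set.empty = PySem.Set.empty := by
  rw [pv_ofList_foldl]
  exact pv_getD_init_aux L _ (fun y => by simp [PySem.Dict.getD_empty]) x

theorem pv_keys_init (L : List Int) (h : L.Nodup) :
    (PySem.Dict.ofList (L.map (fun n => (n, (PySem.Set.empty : PySem.Set Int))))).keys
      = L := by
  rw [pv_ofList_foldl]
  have := PySem.Dict.keys_foldl_insert L (fun _ _ => (PySem.Set.empty : PySem.Set Int))
      PySem.Dict.empty
  simp only [this, PySem.Dict.keys_empty]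
  have : PySem.Set.update ([] : PySem.Set Int) L = PySem.Set.ofList L := rfl
  rw [this, PySem.Set.ofList_eq_self_of_nodup L h]

-- ===== A-side characterisation =====

-- A's inner loop over graph (for a fixed to_node t): keys unchanged when t is a key
theorem pv_A_step_keys (g : List (Int × List Int)) (all : PySem.Set Int) (t : Int)
    (d : PySem.Dict Int (PySem.Set Int)) (ht : d.contains t = true) :
    (g.foldl (fun rev p =>
        if p.2.contains t && all.contains p.1 then
          rev.modify t PySem.Set.empty (fun s => PySem.Set.add s p.1)
        else rev) d).keys = d.keys := by
  induction g generalizing d with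
  | nil => rfl
  | cons p rest ih =>
    simp only [List.foldl_cons]
    split
    · rw [ih _ (by simp [PySem.Dict.contains_modify, ht])]
      rw [PySem.Dict.keys_modify, PySem.Dict.keys_insert_of_contains _ _ ht]
    · exact ih d ht

-- A's inner loop, value at its own key t
theorem pv_A_step_getD (g : List (Int × List Int)) (all : PySem.Set Int) (t : Int)
    (d : PySem.Dict Int (PySem.Set Int)) :
    (g.foldl (fun rev p =>
        if p.2.contains t && all.contains p.1 then
          rev.modify t PySem.Set.empty (fun s => PySem.Set.add s p.1)
        else rev) d).getD t PySem.Set.empty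
      = g.foldl (fun s p =>
          if p.2.contains t && all.contains p.1 then PySem.Set.add s p.1 else s)
          (d.getD t PySem.Set.empty) := by
  induction g generalizing d with
  | nil => rfl
  | cons p rest ih =>
    simp only [List.foldl_cons]
    split
    · rw [ih, PySem.Dict.getD_modify_self]
    · rw [ih]

-- A's inner loop, value at another key
theorem pv_A_step_getD_ne (g : List (Int × List Int)) (all : PySem.Set Int) (t x : Int)
    (hx : x ≠ t) (d : PySem.Dict Int (PySem.Set Int)) :
    (g.foldl (fun rev p =>
        if p.2.contains t && all.contains p.1 then
          rev.modify t PySem.Set.empty (fun s => PySem.Set.add s p.1)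
        else rev) d).getD x PySem.Set.empty = d.getD x PySem.Set.empty := by
  induction g generalizing d with
  | nil => rfl
  | cons p rest ih =>
    simp only [List.foldl_cons]
    split
    · rw [ih, PySem.Dict.getD_modify_of_ne _ _ _ hx]
    · rw [ih]

-- A's outer loop over a list of targets not containing x leaves key x alone
theorem pv_A_outer_getD_notmem (g : List (Int × List Int)) (all : PySem.Set Int)
    (L : List Int) (x : Int) (hx : x ∉ L) (d : PySem.Dict Int (PySem.Set Int)) :
    (L.foldl (fun rev t => g.foldl (fun rev p =>
        if p.2.contains t && all.contains p.1 then
          rev.modify t PySem.Set.empty (fun s => PySem.Set.add s p.1)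
        else rev) rev) d).getD x PySem.Set.empty = d.getD x PySem.Set.empty := by
  induction L generalizing d with
  | nil => rfl
  | cons t rest ih =>
    simp only [List.mem_cons, not_or] at hx
    simp only [List.foldl_cons]
    rw [ih hx.2, pv_A_step_getD_ne g all t x hx.1]

-- A's outer loop: value at a key t ∈ L (L nodup)
theorem pv_A_outer_getD (g : List (Int × List Int)) (all : PySem.Set Int)
    (L : List Int) (hL : L.Nodup) (t : Int) (ht : t ∈ L)
    (d : PySem.Dict Int (PySem.Set Int)) :
    (L.foldl (fun rev t => g.foldl (fun rev p =>
        if p.2.contains t && all.contains p.1 then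
          rev.modify t PySem.Set.empty (fun s => PySem.Set.add s p.1)
        else rev) rev) d).getD t PySem.Set.empty
      = g.foldl (fun s p =>
          if p.2.contains t && all.contains p.1 then PySem.Set.add s p.1 else s)
          (d.getD t PySem.Set.empty) := by
  induction L generalizing d with
  | nil => cases ht
  | cons u rest ih =>
    simp only [List.foldl_cons]
    rcases List.mem_cons.mp ht with h | h
    · subst h
      rw [pv_A_outer_getD_notmem g all rest t (by simpa using hL.notMem), pv_A_step_getD]
    · rw [ih hL.of_cons h]
      rcases eq_or_ne t u with rfl | hne
      · exact absurd h hL.notMem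
      · rw [pv_A_step_getD_ne g all u t hne]

-- A's outer loop: keys unchanged (every target in L is a key of d)
theorem pv_A_outer_keys (g : List (Int × List Int)) (all : PySem.Set Int)
    (L : List Int) (d : PySem.Dict Int (PySem.Set Int))
    (hL : ∀ t ∈ L, d.contains t = true) :
    (L.foldl (fun rev t => g.foldl (fun rev p =>
        if p.2.contains t && all.contains p.1 then
          rev.modify t PySem.Set.empty (fun s => PySem.Set.add s p.1)
        else rev) rev) d).keys = d.keys := by
  induction L generalizing d with
  | nil => rfl
  | cons t rest ih =>
    simp only [List.foldl_cons]
    have hk := pv_A_step_keys g all t d (hL t (by simp))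
    rw [ih _ (fun u hu => by
      rw [PySem.Dict.contains_iff_mem_keys, hk, ← PySem.Dict.contains_iff_mem_keys]
      exact hL u (by simp [hu]))]
    exact hk

-- ===== B-side characterisation =====

-- B's inner grouping loop over one neighbour list, value at a key t of Ks
theorem pv_B_step_getD (nbrs : List Int) (Ks : List Int) (f t : Int)
    (ht : Ks.contains t = true) (d : PySem.Dict Int (PySem.Set Int)) :
    (nbrs.foldl (fun preds x =>
        if Ks.contains x then
          (preds.setdefault x PySem.Set.empty).modify x PySem.Set.empty
            (fun s => PySem.Set.add s f)
        else preds) d).getD t PySem.Set.empty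
      = nbrs.foldl (fun s x => if x = t then PySem.Set.add s f else s)
          (d.getD t PySem.Set.empty) := by
  induction nbrs generalizing d with
  | nil => rfl
  | cons x rest ih =>
    simp only [List.foldl_cons]
    by_cases hc : Ks.contains x = true
    · simp only [hc, if_true]
      rcases eq_or_ne x t with rfl | hne
      · rw [ih, PySem.Dict.getD_modify_self, PySem.Dict.getD_setdefault_self]
        simp
      · rw [ih, PySem.Dict.getD_modify_of_ne _ _ _ (Ne.symm hne),
            PySem.Dict.getD_eq_get?_getD, PySem.Dict.get?_setdefault_of_ne _ _ (Ne.symm hne),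
            ← PySem.Dict.getD_eq_get?_getD]
        simp [hne]
    · have hxt : x ≠ t := fun h => hc (h ▸ ht)
      simp only [hc, Bool.false_eq_true, if_false, hxt, if_false]
      exact ih d

-- B's grouping pass over the whole graph, value at a key t of Ks
theorem pv_B_outer_getD (g : List (Int × List Int)) (Ks : List Int) (t : Int)
    (ht : Ks.contains t = true) (d : PySem.Dict Int (PySem.Set Int)) :
    (g.foldl (fun preds p => p.2.foldl (fun preds x =>
        if Ks.contains x then
          (preds.setdefault x PySem.Set.empty).modify x PySem.Set.empty
            (fun s => PySem.Set.add s p.1)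
        else preds) preds) d).getD t PySem.Set.empty
      = g.foldl (fun s p => if p.2.contains t then PySem.Set.add s p.1 else s)
          (d.getD t PySem.Set.empty) := by
  induction g generalizing d with
  | nil => rfl
  | cons p rest ih =>
    simp only [List.foldl_cons]
    rw [ih, pv_B_step_getD _ _ _ _ ht, pv_inner_fold]

-- ===== VERDICT (by name: the statement is the Claim_ definition above) =====
theorem get_rev_graph_spec : Claim_equal_get_rev_graph := by
  intro graph _hdom hpre
  unfold Spec_get_rev_graph get_rev_graph get_rev_graph_alt get_all_nodes
  have hK : PySem.Set.ofList (graph.map Prod.fst) = graph.map Prod.fst :=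
    PySem.Set.ofList_eq_self_of_nodup _ hpre
  set K := graph.map Prod.fst with hKdef
  simp only [hK]
  set d0 := PySem.Dict.ofList (K.map (fun n => (n, (PySem.Set.empty : PySem.Set Int)))) with hd0
  have hkeys0 : d0.keys = K := pv_keys_init K hpre
  have hcont : ∀ t ∈ K, d0.contains t = true := fun t htk => by
    rw [PySem.Dict.contains_iff_mem_keys, hkeys0]; exact htk
  -- A's result as a map over its (unchanged) keys
  have hAkeys := pv_A_outer_keys graph K K d0 hcont
  rw [PySem.Dict.items_eq_map_keys _ (by rw [hAkeys, hkeys0]; exact hpre) PySem.Set.empty,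
      hAkeys, hkeys0]
  -- B's result is a map over the same keys
  have hBmap : graph.map (fun q => (q.1,
      (graph.foldl (fun preds p => p.2.foldl (fun preds x =>
        if K.contains x then
          (preds.setdefault x PySem.Set.empty).modify x PySem.Set.empty
            (fun s => PySem.Set.add s p.1)
        else preds) preds) PySem.Dict.empty).getD q.1 PySem.Set.empty))
      = K.map (fun t => (t,
      (graph.foldl (fun preds p => p.2.foldl (fun preds x =>
        if K.contains x then
          (preds.setdefault x PySem.Set.empty).modify x PySem.Set.empty
            (fun s => PySem.Set.add s p.1)
        else preds) preds) PySem.Dict.empty).getD t PySem.Set.empty)) := by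
    rw [hKdef, List.map_map]; rfl
  rw [hBmap]
  refine List.map_congr_left fun t ht => ?_
  have htc : K.contains t = true := by simpa [List.contains_eq_mem] using ht
  rw [pv_A_outer_getD graph K K hpre t ht d0, pv_getD_init,
      pv_B_outer_getD graph K t htc PySem.Dict.empty, PySem.Dict.getD_empty]
  refine congrArg (fun s => (t, s)) ?_
  refine PySem.List.foldl_congr_mem _ _ _ _ ?_
  intro s p hp
  have hpk : p.1 ∈ K := List.mem_map_of_mem hp
  have hc : PySem.Set.contains K p.1 = true := by
    simpa [PySem.Set.contains, List.contains_eq_mem] using hpk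
  simp [hpk]
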